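-- pv_equiv track=rewrite | github.com/carolinux/advent_of_code | 2025/10/sol2.py | apply
-- ===== SOURCE A (Python) =====
-- def apply(state, ix, togs, last, target, times):
--     new_state = []
--     tog = togs[ix]
--
--
--     for i in range(len(state)):
--         if i in tog:
--             new_state.append(state[i]+times)
--         else:
--             new_state.append(state[i])
--         if new_state[i] > target[i]:
--             return None, False
--         if new_state[i] < target[i] and last[i]<=ix:
--             return None, True
--     return tuple(new_state), True
-- ===== SOURCE B (Python) =====
-- def apply(state, ix, togs, last, target, times):
--     # Build the full updated vector, then decide the result by comparing the
--     # first over-target index with the first stuck (under-target, last<=ix)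
--     # index -- no fused scan with early returns.
--     tog = set(togs[ix])
--     new_state = tuple(v + times if i in tog else v for i, v in enumerate(state))
--     n = len(new_state)
--     over = next((i for i in range(n) if new_state[i] > target[i]), n)
--     under = next((i for i in range(n) if new_state[i] < target[i] and last[i] <= ix), n)
--     if over == n and under == n:
--         return new_state, True
--     return (None, False) if over < under else (None, True)
-- ===== Notes on version B (the rewrite author's own statement) =====
-- stated objective: alternative
-- what changed: A fuses building new_state with ordered early-return bound checks in one loop; B builds the full updated vector, then computes two independent first-hit indices (first over-target, first under-target-and-stuck) and decides the result by comparing those indices instead of scanning with early returns.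
-- outside the precondition, e.g. on apply([5, 0], 0, {0: []}, [9, 9], [1], 0): A returns (None, False), B raises IndexError
import Mathlib
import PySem

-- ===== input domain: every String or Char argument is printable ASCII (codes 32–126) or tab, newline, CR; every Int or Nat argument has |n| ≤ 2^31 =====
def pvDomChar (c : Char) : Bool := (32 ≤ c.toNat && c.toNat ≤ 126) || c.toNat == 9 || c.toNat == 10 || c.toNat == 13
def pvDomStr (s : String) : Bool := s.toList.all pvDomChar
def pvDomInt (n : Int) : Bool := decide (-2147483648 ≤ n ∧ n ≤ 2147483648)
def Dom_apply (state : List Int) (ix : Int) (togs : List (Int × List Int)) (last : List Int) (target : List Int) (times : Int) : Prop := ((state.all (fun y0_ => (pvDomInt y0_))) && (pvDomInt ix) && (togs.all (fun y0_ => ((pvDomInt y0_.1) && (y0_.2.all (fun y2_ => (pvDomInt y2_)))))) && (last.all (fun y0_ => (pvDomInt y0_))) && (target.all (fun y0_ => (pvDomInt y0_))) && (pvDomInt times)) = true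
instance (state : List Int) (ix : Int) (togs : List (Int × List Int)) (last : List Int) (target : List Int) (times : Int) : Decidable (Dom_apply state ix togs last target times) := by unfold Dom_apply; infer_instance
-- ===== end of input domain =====

-- B replaces A's fused build-and-check loop with early returns by: build the whole
-- updated vector, then compare two independently computed first-violation indices;
-- objective: alternative decomposition, same results on Pre_.

-- ===== PORT A =====
-- the for-loop of A: i is the loop index, acc the new_state built so far.
-- list indexing is via getD; under Pre_apply every index accessed is in range.
def applyLoopA (state tog last target : List Int) (ix times : Int) (i : Nat) (acc : List Int) :
    Option (List Int) × Bool :=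
  if _h : i < state.length then
    let acc' := if (i : Int) ∈ tog then acc ++ [state.getD i 0 + times] else acc ++ [state.getD i 0]
    if acc'.getD i 0 > target.getD i 0 then (none, false)
    else if acc'.getD i 0 < target.getD i 0 ∧ last.getD i 0 ≤ ix then (none, true)
    else applyLoopA state tog last target ix times (i + 1) acc'
  else (some acc, true)
termination_by state.length - i

def apply (state : List Int) (ix : Int) (togs : List (Int × List Int)) (last : List Int) (target : List Int) (times : Int) : Option (List Int) × Bool :=
  match PySem.Dict.get? (PySem.Dict.mk togs) ix with
  | none => (none, false)   -- Python: KeyError (excluded by Pre_apply)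
  | some tog => applyLoopA state tog last target ix times 0 []

-- ===== PORT B =====
-- next((i for i in range(n) if p i), n): first index in [i, n) satisfying p, else n
def firstSat (n : Nat) (p : Nat → Bool) (i : Nat) : Nat :=
  if i < n then (if p i then i else firstSat n p (i + 1)) else n
termination_by n - i

def apply_alt (state : List Int) (ix : Int) (togs : List (Int × List Int)) (last : List Int) (target : List Int) (times : Int) : Option (List Int) × Bool :=
  match PySem.Dict.get? (PySem.Dict.mk togs) ix with
  | none => (none, false)   -- Python: KeyError (excluded by Pre_apply)
  | some togList =>
    let tog : PySem.Set Int := PySem.Set.ofList togList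
    let newState := (PySem.List.enumerate state).map (fun p => if tog.contains p.1 then p.2 + times else p.2)
    let n := newState.length
    let iOver := firstSat n (fun i => decide (newState.getD i 0 > target.getD i 0)) 0
    let iUnder := firstSat n (fun i => decide (newState.getD i 0 < target.getD i 0 ∧ last.getD i 0 ≤ ix)) 0
    if iOver = n ∧ iUnder = n then (some newState, true)
    else if iOver < iUnder then (none, false) else (none, true)

-- ===== PRECONDITION & SPEC =====
-- Pre_ excludes inputs where togs lacks the key ix (A raises KeyError) and inputs where
-- last or target is shorter than state: there A raises IndexError unless an early return
-- fires first, so whether A returns at all depends on the data, not the shape (and B's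
-- index searches raise IndexError on such shapes).
def Pre_apply (state : List Int) (ix : Int) (togs : List (Int × List Int)) (last : List Int) (target : List Int) (times : Int) : Prop :=
  (PySem.Dict.mk togs).contains ix = true ∧ state.length ≤ last.length ∧ state.length ≤ target.length
instance (state : List Int) (ix : Int) (togs : List (Int × List Int)) (last : List Int) (target : List Int) (times : Int) : Decidable (Pre_apply state ix togs last target times) := by unfold Pre_apply; infer_instance

def pvWitness_apply : List Int × Int × (List (Int × List Int)) × List Int × List Int × Int :=
  ([1, 2], 0, [(0, [0])], [5, 5], [3, 3], 1)

def Spec_apply (state : List Int) (ix : Int) (togs : List (Int × List Int)) (last : List Int) (target : List Int) (times : Int) (out : Option (List Int) × Bool) : Prop := out = apply_alt state ix togs last target times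
instance (state : List Int) (ix : Int) (togs : List (Int × List Int)) (last : List Int) (target : List Int) (times : Int) (out : Option (List Int) × Bool) : Decidable (Spec_apply state ix togs last target times out) := by unfold Spec_apply; infer_instance

-- ===== CLAIM (what is proved, stated in full; the proofs are below) =====
def Claim_equal_apply : Prop := ∀ (state : List Int) (ix : Int) (togs : List (Int × List Int)) (last : List Int) (target : List Int) (times : Int), Dom_apply state ix togs last target times → Pre_apply state ix togs last target times → Spec_apply state ix togs last target times (apply state ix togs last target times)

-- ===== LEMMAS AND PROOFS =====

theorem pvWitness_apply_ok :
    Dom_apply (pvWitness_apply.1) (pvWitness_apply.2.1) (pvWitness_apply.2.2.1) (pvWitness_apply.2.2.2.1) (pvWitness_apply.2.2.2.2.1) (pvWitness_apply.2.2.2.2.2) ∧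
    Pre_apply (pvWitness_apply.1) (pvWitness_apply.2.1) (pvWitness_apply.2.2.1) (pvWitness_apply.2.2.2.1) (pvWitness_apply.2.2.2.2.1) (pvWitness_apply.2.2.2.2.2) := by
  decide

-- the vector built in B's first phase
def nsB (state : List Int) (togList : List Int) (times : Int) : List Int :=
  (PySem.List.enumerate state).map
    (fun p => if (PySem.Set.ofList togList).contains p.1 then p.2 + times else p.2)

theorem length_nsB (state togList : List Int) (times : Int) :
    (nsB state togList times).length = state.length := by
  simp [nsB, PySem.List.length_enumerate]

theorem getElem_nsB (state togList : List Int) (times : Int) (i : Nat) (h : i < state.length) :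
    (nsB state togList times)[i]'(by simpa [length_nsB] using h) =
      if (i : Int) ∈ togList then state[i] + times else state[i] := by
  simp [nsB, PySem.List.getElem_enumerate, PySem.Set.mem_ofList]

theorem firstSat_ge_aux (n : Nat) (p : Nat → Bool) :
    ∀ (k i : Nat), n - i ≤ k → i ≤ n → i ≤ firstSat n p i := by
  intro k
  induction k with
  | zero =>
    intro i hk hi
    have hi' : i = n := by omega
    subst hi'
    rw [firstSat, if_neg (by omega)]
  | succ k ih =>
    intro i hk hi
    by_cases h : i < n
    · rw [firstSat, if_pos h]
      by_cases hp : p i = true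
      · rw [if_pos hp]
      · rw [if_neg hp]
        exact le_trans (by omega) (ih (i + 1) (by omega) (by omega))
    · have hi' : i = n := by omega
      subst hi'
      rw [firstSat, if_neg (by omega)]

theorem firstSat_ge (n : Nat) (p : Nat → Bool) (i : Nat) (h : i ≤ n) : i ≤ firstSat n p i :=
  firstSat_ge_aux n p (n - i) i (le_refl _) h

theorem firstSat_of_true (n : Nat) (p : Nat → Bool) (i : Nat) (h : i < n) (hp : p i = true) :
    firstSat n p i = i := by
  rw [firstSat, if_pos h, if_pos hp]

theorem firstSat_of_false (n : Nat) (p : Nat → Bool) (i : Nat) (h : i < n) (hp : p i = false) :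
    firstSat n p i = firstSat n p (i + 1) := by
  rw [firstSat, if_pos h, hp]; simp

-- B's decision as a function of the two search results
def decideB (ns : List Int) (iOver iUnder : Nat) : Option (List Int) × Bool :=
  if iOver = ns.length ∧ iUnder = ns.length then (some ns, true)
  else if iOver < iUnder then (none, false) else (none, true)

-- main invariant: A's fused loop from index i, with new_state so far = (nsB …).take i,
-- equals B's decision computed from the two first-hit searches started at i
theorem loop_eq (state togList last target : List Int) (ix times : Int)
    (ht : state.length ≤ target.length) :
    ∀ (n i : Nat), state.length - i ≤ n → i ≤ state.length →
    applyLoopA state togList last target ix times i ((nsB state togList times).take i) =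
      decideB (nsB state togList times)
        (firstSat (nsB state togList times).length
          (fun j => decide ((nsB state togList times).getD j 0 > target.getD j 0)) i)
        (firstSat (nsB state togList times).length
          (fun j => decide ((nsB state togList times).getD j 0 < target.getD j 0 ∧ last.getD j 0 ≤ ix)) i) := by
  have hlen : (nsB state togList times).length = state.length := length_nsB state togList times
  intro n
  induction n with
  | zero =>
    intro i hn hi
    have hend : i = state.length := by omega
    subst hend
    rw [applyLoopA, dif_neg (by omega)]
    rw [firstSat, if_neg (by omega), firstSat, if_neg (by omega)]
    rw [List.take_of_length_le (le_of_eq hlen), decideB, if_pos ⟨rfl, rfl⟩]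
  | succ n ih =>
    intro i hn hi
    by_cases h : i < state.length
    · have hnsi : i < (nsB state togList times).length := by omega
      have hT : i < target.length := lt_of_lt_of_le h ht
      have hval : (if (i : Int) ∈ togList then state.getD i 0 + times else state.getD i 0) =
          (nsB state togList times)[i] := by
        rw [getElem_nsB state togList times i h]
        split_ifs <;> simp [List.getD_eq_getElem?_getD, List.getElem?_eq_getElem h]
      have hlent : ((nsB state togList times).take i).length = i := by
        rw [List.length_take]; omega
      have htake : (nsB state togList times).take i ++ [(nsB state togList times)[i]] =
          (nsB state togList times).take (i + 1) := by
        rw [List.take_add_one]; simp [List.getElem?_eq_getElem hnsi]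
      have hsel : (if (i : Int) ∈ togList then
              (nsB state togList times).take i ++ [state.getD i 0 + times]
            else (nsB state togList times).take i ++ [state.getD i 0]) =
          (nsB state togList times).take (i + 1) := by
        rw [← htake, ← hval]; split_ifs <;> rfl
      have hgacc : ((nsB state togList times).take (i + 1)).getD i 0 =
          (nsB state togList times)[i] := by
        rw [← htake, List.getD_eq_getElem?_getD, List.getElem?_append_right hlent.le]
        simp [hlent]
      have hgns : (nsB state togList times).getD i 0 = (nsB state togList times)[i] := by
        simp [List.getD_eq_getElem?_getD, List.getElem?_eq_getElem hnsi]
      have hgt : target.getD i 0 = target[i] := by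
        simp [List.getD_eq_getElem?_getD, List.getElem?_eq_getElem hT]
      rw [applyLoopA, dif_pos h]
      simp only [hsel, hgacc, hgt]
      by_cases h1 : (nsB state togList times)[i] > target[i]
      · rw [if_pos h1]
        rw [firstSat_of_true _ _ _ hnsi (by simp only [hgns, hgt, decide_eq_true_eq]; exact h1)]
        rw [firstSat_of_false _ _ i hnsi (by
          simp only [hgns, hgt, decide_eq_false_iff_not]
          rintro ⟨hlt, -⟩; omega)]
        have hU := firstSat_ge (nsB state togList times).length
          (fun j => decide ((nsB state togList times).getD j 0 < target.getD j 0 ∧ last.getD j 0 ≤ ix))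
          (i + 1) (by omega)
        rw [decideB, if_neg (by omega), if_pos (by omega)]
      · rw [if_neg h1]
        by_cases h2 : (nsB state togList times)[i] < target[i] ∧ last.getD i 0 ≤ ix
        · rw [if_pos h2]
          rw [firstSat_of_false _ _ i hnsi (by
            simp only [hgns, hgt, decide_eq_false_iff_not]; exact h1)]
          rw [firstSat_of_true _ _ _ hnsi (by
            simp only [hgns, hgt, decide_eq_true_eq]; exact h2)]
          have hO := firstSat_ge (nsB state togList times).length
            (fun j => decide ((nsB state togList times).getD j 0 > target.getD j 0))
            (i + 1) (by omega)
          rw [decideB, if_neg (by omega), if_neg (by omega)]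
        · rw [if_neg h2]
          rw [firstSat_of_false _ (fun j => decide ((nsB state togList times).getD j 0 > target.getD j 0))
            i hnsi (by simp only [hgns, hgt, decide_eq_false_iff_not]; exact h1)]
          rw [firstSat_of_false _
            (fun j => decide ((nsB state togList times).getD j 0 < target.getD j 0 ∧ last.getD j 0 ≤ ix))
            i hnsi (by simp only [hgns, hgt, decide_eq_false_iff_not]; exact h2)]
          exact ih (i + 1) (by omega) (by omega)
    · have hend : i = state.length := by omega
      subst hend
      exact ih state.length (by omega) (by omega)

-- ===== VERDICT (by name: the statement is the Claim_ definition above) =====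
theorem apply_spec : Claim_equal_apply := by
  intro state ix togs last target times _hD hPre
  obtain ⟨_hk, _hl, ht⟩ := hPre
  unfold Spec_apply apply apply_alt
  cases hg : PySem.Dict.get? (PySem.Dict.mk togs) ix with
  | none => rfl
  | some togList =>
    have h0 := loop_eq state togList last target ix times ht state.length 0 (by omega) (by omega)
    simpa [nsB, decideB] using h0
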